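-- pv_equiv track=rewrite | github.com/Marijn3/Road-Model-code | functions.py | get_annotation
-- ===== SOURCE A (Python) =====
-- def get_annotation(section_verw_eigs: dict, start_skip: bool = False, end_skip: bool = False) -> dict:
--     """
--     Determines the annotation to be added to the current recursive
--     search based on processing properties of the current section.
--     Args:
--         section_verw_eigs (dict): Processing properties of section
--         start_skip (bool): Indicate whether the start values of the section should be considered.
--         end_skip (bool): Indicate whether the end values of the section should be considered.
--     Returns:
--         Dict indicating the lane number and the annotation - the type of special case encountered.
--     """
--     annotation = {}
--
--     if not start_skip:
--         if "Uitrijstrook" in section_verw_eigs["Start_kenmerk"].values():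
--             annotation.update({lane_nr: lane_type for lane_nr, lane_type in
--                                section_verw_eigs["Start_kenmerk"].items() if lane_type == "Uitrijstrook"})
--
--         if "Samenvoeging" in section_verw_eigs["Start_kenmerk"].values():
--             annotation.update({lane_nr: lane_type for lane_nr, lane_type in
--                                section_verw_eigs["Start_kenmerk"].items() if lane_type == "Samenvoeging"})
--
--         if "Weefstrook" in section_verw_eigs["Start_kenmerk"].values():
--             annotation.update({lane_nr: lane_type for lane_nr, lane_type in
--                                section_verw_eigs["Start_kenmerk"].items() if lane_type == "Weefstrook"})
--
--     if not end_skip: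
--         if "Invoegstrook" in section_verw_eigs["Einde_kenmerk"].values():
--             annotation.update({lane_nr: lane_type for lane_nr, lane_type in
--                                section_verw_eigs["Einde_kenmerk"].items() if lane_type == "Invoegstrook"})
--
--         if "Special" in section_verw_eigs["Einde_kenmerk"].keys():
--             annotation.update({value[1]: value[0] for keyword, value in
--                                section_verw_eigs["Einde_kenmerk"].items() if keyword == "Special"})
--
--     return annotation
-- ===== SOURCE B (Python) =====
-- def get_annotation(section_verw_eigs: dict, start_skip: bool = False, end_skip: bool = False) -> dict:
--     """Single-pass bucketing re-implementation: one scan per kenmerk dict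
--     collects the lanes of each relevant type (and the 'Special' value);
--     the annotation is then assembled in the fixed priority order."""
--     annotation = {}
--
--     if not start_skip:
--         uit, sam, weef = [], [], []
--         for lane_nr, lane_type in section_verw_eigs["Start_kenmerk"].items():
--             if lane_type == "Uitrijstrook":
--                 uit.append(lane_nr)
--             elif lane_type == "Samenvoeging":
--                 sam.append(lane_nr)
--             elif lane_type == "Weefstrook":
--                 weef.append(lane_nr)
--         for lane_nr in uit:
--             annotation[lane_nr] = "Uitrijstrook"
--         for lane_nr in sam:
--             annotation[lane_nr] = "Samenvoeging"
--         for lane_nr in weef: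
--             annotation[lane_nr] = "Weefstrook"
--
--     if not end_skip:
--         invoeg, special = [], None
--         for lane_nr, lane_type in section_verw_eigs["Einde_kenmerk"].items():
--             if lane_type == "Invoegstrook":
--                 invoeg.append(lane_nr)
--             if lane_nr == "Special":
--                 special = lane_type
--         for lane_nr in invoeg:
--             annotation[lane_nr] = "Invoegstrook"
--         if special is not None:
--             annotation[special[1]] = special[0]
--
--     return annotation
-- ===== Notes on version B (the rewrite author's own statement) =====
-- stated objective: alternative
-- what changed: Replaces A's five per-keyword membership-guarded dict-comprehension scans by a single bucketing pass over each kenmerk dict (collecting the lanes of each relevant type and the 'Special' value) followed by one ordered assembly pass.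
import Mathlib
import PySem

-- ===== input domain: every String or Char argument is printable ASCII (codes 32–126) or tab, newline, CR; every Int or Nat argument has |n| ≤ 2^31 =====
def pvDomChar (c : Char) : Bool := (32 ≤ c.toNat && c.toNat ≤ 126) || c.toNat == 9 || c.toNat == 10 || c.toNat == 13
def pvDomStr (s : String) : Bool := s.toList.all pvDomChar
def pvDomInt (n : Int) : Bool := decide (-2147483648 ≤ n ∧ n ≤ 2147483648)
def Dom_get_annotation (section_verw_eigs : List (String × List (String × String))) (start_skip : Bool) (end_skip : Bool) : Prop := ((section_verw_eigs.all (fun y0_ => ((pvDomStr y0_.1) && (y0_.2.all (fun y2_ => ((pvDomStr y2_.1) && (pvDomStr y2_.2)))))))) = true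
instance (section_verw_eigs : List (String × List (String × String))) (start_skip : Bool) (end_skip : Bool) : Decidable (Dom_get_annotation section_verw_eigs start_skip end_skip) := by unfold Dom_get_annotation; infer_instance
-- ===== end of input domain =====

-- B replaces A's five per-keyword membership-guarded comprehension scans by a single
-- bucketing pass over each kenmerk dict followed by one ordered assembly pass (alternative, not claimed faster).


-- ===== PORT A =====
-- literal port of A: membership guard, then annotation.update(dict-comprehension) per keyword;
-- v[1]/v[0] of the 'Special' value via PySem.Str.pyGet? (Pre_ keeps it in range; "" is never reached inside Pre_)
def get_annotation (section_verw_eigs : List (String × List (String × String))) (start_skip : Bool) (end_skip : Bool) : List (String × String) :=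
  let svd : PySem.Dict String (List (String × String)) := PySem.Dict.mk section_verw_eigs
  let ann0 : PySem.Dict String String := PySem.Dict.empty
  let ann1 :=
    if !start_skip then
      let start : PySem.Dict String String := PySem.Dict.mk (svd.getD "Start_kenmerk" [])
      let a1 := if "Uitrijstrook" ∈ start.values then
          ann0.update (PySem.Dict.ofList (start.items.filter (fun p => p.2 == "Uitrijstrook"))).items else ann0
      let a2 := if "Samenvoeging" ∈ start.values then
          a1.update (PySem.Dict.ofList (start.items.filter (fun p => p.2 == "Samenvoeging"))).items else a1
      let a3 := if "Weefstrook" ∈ start.values then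
          a2.update (PySem.Dict.ofList (start.items.filter (fun p => p.2 == "Weefstrook"))).items else a2
      a3
    else ann0
  let ann2 :=
    if !end_skip then
      let einde : PySem.Dict String String := PySem.Dict.mk (svd.getD "Einde_kenmerk" [])
      let b1 := if "Invoegstrook" ∈ einde.values then
          ann1.update (PySem.Dict.ofList (einde.items.filter (fun p => p.2 == "Invoegstrook"))).items else ann1
      let b2 := if "Special" ∈ einde.keys then
          b1.update (PySem.Dict.ofList ((einde.items.filter (fun p => p.1 == "Special")).map
            (fun p => (((PySem.Str.pyGet? p.2 1).map (fun c => String.ofList [c])).getD "",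
                       ((PySem.Str.pyGet? p.2 0).map (fun c => String.ofList [c])).getD "")))).items else b1
      b2
    else ann1
  ann2.items

-- ===== PORT B =====
-- literal port of Source B: one bucketing fold per kenmerk dict, then ordered assembly
def get_annotation_alt (section_verw_eigs : List (String × List (String × String))) (start_skip : Bool) (end_skip : Bool) : List (String × String) :=
  let svd : PySem.Dict String (List (String × String)) := PySem.Dict.mk section_verw_eigs
  let ann0 : PySem.Dict String String := PySem.Dict.empty
  let ann1 :=
    if !start_skip then
      let acc := (svd.getD "Start_kenmerk" []).foldl
        (fun (acc : List String × List String × List String) p =>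
          if p.2 == "Uitrijstrook" then (acc.1 ++ [p.1], acc.2.1, acc.2.2)
          else if p.2 == "Samenvoeging" then (acc.1, acc.2.1 ++ [p.1], acc.2.2)
          else if p.2 == "Weefstrook" then (acc.1, acc.2.1, acc.2.2 ++ [p.1])
          else acc) ([], [], [])
      let d1 := acc.1.foldl (fun d k => d.insert k "Uitrijstrook") ann0
      let d2 := acc.2.1.foldl (fun d k => d.insert k "Samenvoeging") d1
      acc.2.2.foldl (fun d k => d.insert k "Weefstrook") d2
    else ann0
  let ann2 :=
    if !end_skip then
      let acc := (svd.getD "Einde_kenmerk" []).foldl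
        (fun (acc : List String × Option String) p =>
          let acc1 := if p.2 == "Invoegstrook" then (acc.1 ++ [p.1], acc.2) else acc
          if p.1 == "Special" then (acc1.1, some p.2) else acc1) ([], none)
      let d1 := acc.1.foldl (fun d k => d.insert k "Invoegstrook") ann1
      match acc.2 with
      | some v => d1.insert (((PySem.Str.pyGet? v 1).map (fun c => String.ofList [c])).getD "")
                            (((PySem.Str.pyGet? v 0).map (fun c => String.ofList [c])).getD "")
      | none => d1
    else ann1
  ann2.items

-- ===== PRECONDITION & SPEC =====
-- Pre_ excludes (i) inputs where Python A raises KeyError ('Start_kenmerk'/'Einde_kenmerk' missing while used)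
-- or IndexError (an accessed 'Special' value shorter than 2 characters), and (ii) assoc lists whose accessed
-- inner list has duplicate keys — those do not encode a Python dict (dict[str,str] has unique keys), so A never
-- receives them; no other narrowing.
def Pre_get_annotation (section_verw_eigs : List (String × List (String × String))) (start_skip : Bool) (end_skip : Bool) : Prop :=
  (start_skip = false →
     (PySem.Dict.mk section_verw_eigs).contains "Start_kenmerk" = true ∧
     (((PySem.Dict.mk section_verw_eigs).getD "Start_kenmerk" []).map Prod.fst).Nodup) ∧
  (end_skip = false →
     (PySem.Dict.mk section_verw_eigs).contains "Einde_kenmerk" = true ∧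
     (((PySem.Dict.mk section_verw_eigs).getD "Einde_kenmerk" []).map Prod.fst).Nodup ∧
     (∀ p ∈ (PySem.Dict.mk section_verw_eigs).getD "Einde_kenmerk" [], p.1 = "Special" → 2 ≤ p.2.toList.length))
instance (section_verw_eigs : List (String × List (String × String))) (start_skip : Bool) (end_skip : Bool) : Decidable (Pre_get_annotation section_verw_eigs start_skip end_skip) := by unfold Pre_get_annotation; infer_instance

def pvWitness_get_annotation : (List (String × List (String × String))) × Bool × Bool :=
  ([("Start_kenmerk", [("1", "Weefstrook"), ("2", "Uitrijstrook")]),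
    ("Einde_kenmerk", [("3", "Invoegstrook"), ("Special", "ab")])], false, false)

def Spec_get_annotation (section_verw_eigs : List (String × List (String × String))) (start_skip : Bool) (end_skip : Bool) (out : List (String × String)) : Prop := out = get_annotation_alt section_verw_eigs start_skip end_skip
instance (section_verw_eigs : List (String × List (String × String))) (start_skip : Bool) (end_skip : Bool) (out : List (String × String)) : Decidable (Spec_get_annotation section_verw_eigs start_skip end_skip out) := by unfold Spec_get_annotation; infer_instance

-- ===== CLAIM (what is proved, stated in full; the proofs are below) =====
def Claim_equal_get_annotation : Prop := ∀ (section_verw_eigs : List (String × List (String × String))) (start_skip : Bool) (end_skip : Bool), Dom_get_annotation section_verw_eigs start_skip end_skip → Pre_get_annotation section_verw_eigs start_skip end_skip → Spec_get_annotation section_verw_eigs start_skip end_skip (get_annotation section_verw_eigs start_skip end_skip)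

-- ===== LEMMAS AND PROOFS =====

lemma pv_ofList_items_of_nodup {κ ν : Type} [BEq κ] [LawfulBEq κ]
    (l : List (κ × ν)) (h : (l.map Prod.fst).Nodup) : (PySem.Dict.ofList l).items = l := by
  induction l using List.reverseRecOn with
  | nil => rfl
  | append_singleton xs p ih =>
      rw [List.map_append, List.nodup_append] at h
      have hx : (xs.map Prod.fst).Nodup := h.1
      have hk : p.1 ∉ xs.map Prod.fst := by
        intro hm
        exact h.2.2 p.1 hm p.1 (by simp) rfl
      have hof : PySem.Dict.ofList (xs ++ [p]) = (PySem.Dict.ofList xs).insert p.1 p.2 := by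
        simp [PySem.Dict.ofList, PySem.Dict.update, List.foldl_append]
      rw [hof]
      have hc : (PySem.Dict.ofList xs).contains p.1 = false := by
        have hiff := PySem.Dict.contains_iff_mem_keys (d := PySem.Dict.ofList xs) (k := p.1)
        simp only [PySem.Dict.keys, ih hx] at hiff
        cases hcc : (PySem.Dict.ofList xs).contains p.1
        · rfl
        · exact absurd (hiff.mp hcc) hk
      simp [PySem.Dict.insert, hc, ih hx]

lemma pv_foldl_insert_const (kw : String) (m : List (String × String))
    (hm : ∀ p ∈ m, p.2 = kw) (d : PySem.Dict String String) :
    m.foldl (fun d p => d.insert p.1 p.2) d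
      = (m.map Prod.fst).foldl (fun d k => d.insert k kw) d := by
  induction m generalizing d with
  | nil => rfl
  | cons p t ih =>
      simp only [List.foldl_cons, List.map_cons]
      rw [hm p (by simp), ih (fun q hq => hm q (by simp [hq]))]

lemma pv_step_eq (l : List (String × String)) (kw : String)
    (h : (l.map Prod.fst).Nodup) (d : PySem.Dict String String) :
    (if kw ∈ l.map Prod.snd then
        d.update (PySem.Dict.ofList (l.filter (fun p => p.2 == kw))).items else d)
      = ((l.filter (fun p => p.2 == kw)).map Prod.fst).foldl (fun d k => d.insert k kw) d := by
  have hnf : ((l.filter (fun p => p.2 == kw)).map Prod.fst).Nodup :=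
    (List.Sublist.map Prod.fst (List.filter_sublist (l := l))).nodup h
  by_cases hm : kw ∈ l.map Prod.snd
  · rw [if_pos hm, pv_ofList_items_of_nodup _ hnf, PySem.Dict.update,
        pv_foldl_insert_const kw _ (fun p hp => by simpa using (List.mem_filter.mp hp).2) d]
  · rw [if_neg hm]
    have hf : l.filter (fun p => p.2 == kw) = [] := by
      apply List.filter_eq_nil_iff.mpr
      intro p hp hpk
      exact hm (List.mem_map.mpr ⟨p, hp, by simpa using hpk⟩)
    rw [hf]
    rfl

lemma pv_triple_fold (l : List (String × String)) (a b c : List String) :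
    l.foldl (fun (acc : List String × List String × List String) p =>
          if p.2 == "Uitrijstrook" then (acc.1 ++ [p.1], acc.2.1, acc.2.2)
          else if p.2 == "Samenvoeging" then (acc.1, acc.2.1 ++ [p.1], acc.2.2)
          else if p.2 == "Weefstrook" then (acc.1, acc.2.1, acc.2.2 ++ [p.1])
          else acc) (a, b, c)
      = (a ++ (l.filter (fun p => p.2 == "Uitrijstrook")).map Prod.fst,
         b ++ (l.filter (fun p => p.2 == "Samenvoeging")).map Prod.fst,
         c ++ (l.filter (fun p => p.2 == "Weefstrook")).map Prod.fst) := by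
  induction l generalizing a b c with
  | nil => simp
  | cons p t ih =>
      simp only [beq_iff_eq] at ih
      by_cases h1 : p.2 = "Uitrijstrook"
      · simp [List.filter_cons, h1, ih]
      · by_cases h2 : p.2 = "Samenvoeging"
        · simp [List.filter_cons, h1, h2, ih]
        · by_cases h3 : p.2 = "Weefstrook"
          · simp [List.filter_cons, h1, h2, h3, ih]
          · simp [List.filter_cons, h1, h2, h3, ih]

lemma pv_end_fold (l : List (String × String)) (a : List String) (o : Option String)
    (h : (l.map Prod.fst).Nodup) :
    l.foldl (fun (acc : List String × Option String) p =>
          let acc1 := if p.2 == "Invoegstrook" then (acc.1 ++ [p.1], acc.2) else acc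
          if p.1 == "Special" then (acc1.1, some p.2) else acc1) (a, o)
      = (a ++ (l.filter (fun p => p.2 == "Invoegstrook")).map Prod.fst,
         match List.lookup "Special" l with
         | some v => some v
         | none => o) := by
  induction l generalizing a o with
  | nil => simp
  | cons p t ih =>
      rw [List.map_cons, List.nodup_cons] at h
      simp only [beq_iff_eq] at ih
      by_cases hs : p.1 = "Special"
      · have ht : List.lookup "Special" t = none := by
          apply List.lookup_eq_none_iff.mpr
          intro q hq
          have : q.1 ≠ "Special" := fun he =>
            (hs ▸ h.1) (he ▸ List.mem_map.mpr ⟨q, hq, rfl⟩)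
          simpa using Ne.symm this
        by_cases hi : p.2 = "Invoegstrook"
        · simp [List.filter_cons, List.lookup, hs, hi, ih _ _ h.2, ht]
        · simp [List.filter_cons, List.lookup, hs, hi, ih _ _ h.2, ht]
      · have hbe : ("Special" == p.1) = false := by
          simp [Ne.symm hs]
        by_cases hi : p.2 = "Invoegstrook"
        · simp [List.filter_cons, List.lookup, hs, hbe, hi, ih _ _ h.2]
        · simp [List.filter_cons, List.lookup, hs, hbe, hi, ih _ _ h.2]

lemma pv_special_filter (l : List (String × String)) (h : (l.map Prod.fst).Nodup) :
    l.filter (fun p => p.1 == "Special")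
      = (match List.lookup "Special" l with
         | some v => [("Special", v)]
         | none => []) := by
  induction l with
  | nil => simp
  | cons p t ih =>
      rw [List.map_cons, List.nodup_cons] at h
      by_cases hs : p.1 = "Special"
      · have ht : List.lookup "Special" t = none := by
          apply List.lookup_eq_none_iff.mpr
          intro q hq
          have : q.1 ≠ "Special" := fun he =>
            (hs ▸ h.1) (he ▸ List.mem_map.mpr ⟨q, hq, rfl⟩)
          simpa using Ne.symm this
        have hf : t.filter (fun p => p.1 == "Special") = [] := by
          rw [ih h.2, ht]
        simp [List.filter_cons, List.lookup, hs, ht, hf]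
        exact Prod.ext hs rfl
      · have hbe : ("Special" == p.1) = false := by
          simp [Ne.symm hs]
        simp [List.filter_cons, List.lookup, hs, hbe, ih h.2]

lemma pv_mem_fst_iff_lookup (l : List (String × String)) (k : String) :
    k ∈ l.map Prod.fst ↔ (List.lookup k l).isSome := by
  induction l with
  | nil => simp
  | cons p t ih =>
      simp only [List.map_cons, List.mem_cons, List.lookup]
      by_cases hk : p.1 = k
      · simp [hk]
      · have hbe : (k == p.1) = false := by simp [Ne.symm hk]
        simp [hbe, Ne.symm hk, ih]

lemma pv_start_block (l : List (String × String)) (h : (l.map Prod.fst).Nodup) :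
    (let start : PySem.Dict String String := PySem.Dict.mk l
     let a1 := if "Uitrijstrook" ∈ start.values then
         (PySem.Dict.empty : PySem.Dict String String).update (PySem.Dict.ofList (start.items.filter (fun p => p.2 == "Uitrijstrook"))).items else PySem.Dict.empty
     let a2 := if "Samenvoeging" ∈ start.values then
         a1.update (PySem.Dict.ofList (start.items.filter (fun p => p.2 == "Samenvoeging"))).items else a1
     let a3 := if "Weefstrook" ∈ start.values then
         a2.update (PySem.Dict.ofList (start.items.filter (fun p => p.2 == "Weefstrook"))).items else a2
     a3)
    = (let acc := l.foldl
        (fun (acc : List String × List String × List String) p =>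
          if p.2 == "Uitrijstrook" then (acc.1 ++ [p.1], acc.2.1, acc.2.2)
          else if p.2 == "Samenvoeging" then (acc.1, acc.2.1 ++ [p.1], acc.2.2)
          else if p.2 == "Weefstrook" then (acc.1, acc.2.1, acc.2.2 ++ [p.1])
          else acc) ([], [], [])
       let d1 := acc.1.foldl (fun d k => d.insert k "Uitrijstrook") (PySem.Dict.empty : PySem.Dict String String)
       let d2 := acc.2.1.foldl (fun d k => d.insert k "Samenvoeging") d1
       acc.2.2.foldl (fun d k => d.insert k "Weefstrook") d2) := by
  show (if "Weefstrook" ∈ (PySem.Dict.mk l).values then _ else _) = _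
  have hv : (PySem.Dict.mk l).values = l.map Prod.snd := rfl
  have hi : (PySem.Dict.mk l).items = l := rfl
  rw [pv_triple_fold l [] [] []]
  simp only [hv, hi, List.nil_append]
  rw [pv_step_eq l "Uitrijstrook" h, pv_step_eq l "Samenvoeging" h, pv_step_eq l "Weefstrook" h]

lemma pv_end_block (l : List (String × String)) (h : (l.map Prod.fst).Nodup)
    (d : PySem.Dict String String) :
    (let einde : PySem.Dict String String := PySem.Dict.mk l
     let b1 := if "Invoegstrook" ∈ einde.values then
         d.update (PySem.Dict.ofList (einde.items.filter (fun p => p.2 == "Invoegstrook"))).items else d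
     let b2 := if "Special" ∈ einde.keys then
         b1.update (PySem.Dict.ofList ((einde.items.filter (fun p => p.1 == "Special")).map
           (fun p => (((PySem.Str.pyGet? p.2 1).map (fun c => String.ofList [c])).getD "",
                      ((PySem.Str.pyGet? p.2 0).map (fun c => String.ofList [c])).getD "")))).items else b1
     b2)
    = (let acc := l.foldl
        (fun (acc : List String × Option String) p =>
          let acc1 := if p.2 == "Invoegstrook" then (acc.1 ++ [p.1], acc.2) else acc
          if p.1 == "Special" then (acc1.1, some p.2) else acc1) ([], none)
       let d1 := acc.1.foldl (fun d k => d.insert k "Invoegstrook") d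
       match acc.2 with
       | some v => d1.insert (((PySem.Str.pyGet? v 1).map (fun c => String.ofList [c])).getD "")
                             (((PySem.Str.pyGet? v 0).map (fun c => String.ofList [c])).getD "")
       | none => d1) := by
  have hv : (PySem.Dict.mk l).values = l.map Prod.snd := rfl
  have hi : (PySem.Dict.mk l).items = l := rfl
  have hk : (PySem.Dict.mk l).keys = l.map Prod.fst := rfl
  rw [pv_end_fold l [] none h]
  simp only [hv, hi, hk, List.nil_append]
  rw [pv_step_eq l "Invoegstrook" h, pv_special_filter l h]
  cases hlk : List.lookup "Special" l with
  | none =>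
      have hmem : "Special" ∉ l.map Prod.fst := by
        rw [pv_mem_fst_iff_lookup, hlk]
        simp
      simp [hmem]
  | some v =>
      have hmem : "Special" ∈ l.map Prod.fst := by
        rw [pv_mem_fst_iff_lookup, hlk]
        simp
      simp only [hmem, if_pos, List.map_cons, List.map_nil]
      congr 1


-- ===== VERDICT (by name: the statement is the Claim_ definition above) =====
theorem get_annotation_spec : Claim_equal_get_annotation := by
  unfold Claim_equal_get_annotation
  intro sve ss es hdom hpre
  unfold Spec_get_annotation
  cases ss with
  | false =>
      obtain ⟨hc1, h1⟩ := hpre.1 rfl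
      cases es with
      | false =>
          obtain ⟨hc2, h2, hlen⟩ := hpre.2 rfl
          simp only [get_annotation, get_annotation_alt, Bool.not_false, Bool.not_true,
            if_true, if_false, Bool.false_eq_true, Bool.true_eq_false, ite_true, ite_false, pv_start_block _ h1, pv_end_block _ h2]
      | true =>
          simp only [get_annotation, get_annotation_alt, Bool.not_false, Bool.not_true,
            if_true, if_false, Bool.false_eq_true, Bool.true_eq_false, ite_true, ite_false, pv_start_block _ h1]
  | true =>
      cases es with
      | false =>
          obtain ⟨hc2, h2, hlen⟩ := hpre.2 rfl
          simp only [get_annotation, get_annotation_alt, Bool.not_false, Bool.not_true,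
            if_true, if_false, Bool.false_eq_true, Bool.true_eq_false, ite_true, ite_false, pv_end_block _ h2]
      | true =>
          simp only [get_annotation, get_annotation_alt, Bool.not_false, Bool.not_true,
            if_true, if_false, Bool.false_eq_true, Bool.true_eq_false, ite_true, ite_false]
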